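-- pv_equiv track=rewrite | github.com/zhenyulincs/rlix | schedrl/scheduler/types.py | derive_dp_ranks_from_gpus
-- ===== SOURCE A (Python) =====
-- from typing import Any, Dict, List, Optional, Set, Tuple
--
-- def derive_dp_ranks_from_gpus(gpu_ids: List[int], tp_size: int) -> Set[int]:
--     if tp_size <= 0:
--         return set()
--     sorted_gpus = sorted(gpu_ids)
--     dp_ranks = set()
--     for i in range(0, len(sorted_gpus), tp_size):
--         dp_ranks.add(i // tp_size)
--     return dp_ranks
-- ===== SOURCE B (Python) =====
-- def derive_dp_ranks_from_gpus(gpu_ids, tp_size):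
--     if tp_size <= 0:
--         return set()
--     return set(range(-(-len(gpu_ids) // tp_size)))
-- ===== Notes on version B (the rewrite author's own statement) =====
-- stated objective: faster
-- what changed: B drops the sort and the stepped loop entirely: the result is exactly set(range(ceil(len(gpu_ids)/tp_size))), built directly in one range call.
import Mathlib
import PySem

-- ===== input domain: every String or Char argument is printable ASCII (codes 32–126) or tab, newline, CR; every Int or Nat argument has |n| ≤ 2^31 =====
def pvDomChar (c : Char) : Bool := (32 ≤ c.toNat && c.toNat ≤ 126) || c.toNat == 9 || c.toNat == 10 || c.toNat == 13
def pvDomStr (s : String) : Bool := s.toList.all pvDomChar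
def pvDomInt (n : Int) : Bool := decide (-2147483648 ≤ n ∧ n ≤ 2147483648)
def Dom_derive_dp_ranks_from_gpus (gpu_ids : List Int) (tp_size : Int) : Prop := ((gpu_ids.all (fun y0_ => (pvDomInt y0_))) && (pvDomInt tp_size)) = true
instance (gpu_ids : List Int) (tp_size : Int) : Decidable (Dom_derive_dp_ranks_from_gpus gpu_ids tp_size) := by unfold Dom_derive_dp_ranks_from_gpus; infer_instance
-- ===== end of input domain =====

-- B replaces A's sort + stepped loop by directly building set(range(ceil(len/tp_size))); equal output, asymptotically faster.


-- ===== PORT A =====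
def derive_dp_ranks_from_gpus (gpu_ids : List Int) (tp_size : Int) : List Int :=
  if tp_size ≤ 0 then []
  else
    let sorted_gpus := PySem.List.sorted gpu_ids (fun x => x)
    (PySem.List.pyRange 0 (sorted_gpus.length) tp_size).foldl
      (fun dp_ranks i => PySem.Set.add dp_ranks (PySem.Int.floordiv i tp_size))
      PySem.Set.empty

-- ===== PORT B =====
def derive_dp_ranks_from_gpus_alt (gpu_ids : List Int) (tp_size : Int) : List Int :=
  if tp_size ≤ 0 then []
  else
    PySem.Set.ofList
      (PySem.List.pyRange 0 (-(PySem.Int.floordiv (-(gpu_ids.length : Int)) tp_size)) 1)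

-- ===== PRECONDITION & SPEC =====
def Spec_derive_dp_ranks_from_gpus (gpu_ids : List Int) (tp_size : Int) (out : List Int) : Prop := out = derive_dp_ranks_from_gpus_alt gpu_ids tp_size
instance (gpu_ids : List Int) (tp_size : Int) (out : List Int) : Decidable (Spec_derive_dp_ranks_from_gpus gpu_ids tp_size out) := by unfold Spec_derive_dp_ranks_from_gpus; infer_instance

-- ===== CLAIM (what is proved, stated in full; the proofs are below) =====
def Claim_equal_derive_dp_ranks_from_gpus : Prop := ∀ (gpu_ids : List Int) (tp_size : Int), Dom_derive_dp_ranks_from_gpus gpu_ids tp_size → Spec_derive_dp_ranks_from_gpus gpu_ids tp_size (derive_dp_ranks_from_gpus gpu_ids tp_size)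

-- ===== LEMMAS AND PROOFS =====

-- ceiling division: -((-n) // tp) equals (n + tp - 1) / tp for tp > 0
theorem pv_ceil_div_eq (n tp : Int) (h : 0 < tp) :
    -(PySem.Int.floordiv (-n) tp) = (n + tp - 1) / tp := by
  rw [PySem.Int.neg_floordiv_neg_eq_iff_of_pos h]
  have h1 := Int.ediv_mul_le (n + tp - 1) (ne_of_gt h)
  have h2 := Int.lt_ediv_add_one_mul_self (n + tp - 1) h
  constructor <;> nlinarith

-- a loop that adds f i for each i is set(map(f, ...))
theorem pv_foldl_add_map {α β : Type} [BEq β] (f : α → β) (xs : List α) :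
    xs.foldl (fun s i => PySem.Set.add s (f i)) PySem.Set.empty
      = PySem.Set.ofList (xs.map f) := by
  rw [PySem.Set.ofList_eq_foldl, List.foldl_map]
  rfl

theorem pv_fold_eq (n tp : Int) (hn : 0 ≤ n) (h : 0 < tp) :
    (PySem.List.pyRange 0 n tp).foldl
      (fun dp_ranks i => PySem.Set.add dp_ranks (PySem.Int.floordiv i tp))
      PySem.Set.empty
    = PySem.Set.ofList (PySem.List.pyRange 0 (-(PySem.Int.floordiv (-n) tp)) 1) := by
  rw [PySem.List.pyRange_of_pos 0 n h, pv_ceil_div_eq n tp h, PySem.List.pyRange_one,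
    pv_foldl_add_map, List.map_map]
  simp only [sub_zero, zero_add]
  have hK : (if (0:Int) < n then ((n + tp - 1) / tp).toNat else 0) = ((n + tp - 1) / tp).toNat := by
    split
    · rfl
    · have hn0 : n = 0 := by omega
      have : (n + tp - 1) / tp = 0 := by
        rw [hn0, zero_add]
        exact Int.ediv_eq_zero_of_lt (by omega) (by omega)
      omega
  rw [hK]
  congr 1
  apply List.map_congr_left
  intro k _
  simp only [Function.comp]
  rw [PySem.Int.floordiv_eq_ediv_of_pos h, Int.mul_ediv_cancel_left _ (ne_of_gt h)]

-- ===== VERDICT (by name: the statement is the Claim_ definition above) =====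
theorem derive_dp_ranks_from_gpus_spec : Claim_equal_derive_dp_ranks_from_gpus := by
  intro gpu_ids tp_size _
  unfold Spec_derive_dp_ranks_from_gpus derive_dp_ranks_from_gpus derive_dp_ranks_from_gpus_alt
  by_cases h : tp_size <= 0
  · simp [h]
  · simp only [if_neg h]
    rw [PySem.List.length_sorted]
    exact pv_fold_eq _ _ (by positivity) (by omega)
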